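-- pv_equiv track=rewrite | github.com/wh75er/calc-algorithms | lab_02/main.py | parsCord
-- ===== SOURCE A (Python) =====
-- def parsCord(matrix, n, x, y, orderX, orderY):                   # a - matrix, n - size, x to find, y to find
--     xa = list(range(n+1))
--     ya = list(range(n+1))
--     clsX = 0
--     clsY = 0
--     minim = abs(x - xa[0])
--     for i in range(n+1):
--         if(abs(x - i) < minim):
--             minim = abs(x - i)
--             clsX = i
--
--     minim = abs(y - ya[0])
--     for i in range(n+1):
--         if(abs(y - i) < minim):
--             minim = abs(y - i)
--             clsY = i
--
--     if(clsX >= n - orderX):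
--         xa = xa[n-orderX:]
--     else:
--         xa = xa[clsX:clsX+orderX+1]
--
--     if(clsY >= n - orderY):
--         ya = ya[n-orderY:]
--     else:
--         ya = ya[clsY:clsY+orderY+1]
--
--     parsedMatrix = matrix[ya[0]:ya[len(ya)-1]+1]
--     for i in range(len(parsedMatrix)):
--         parsedMatrix[i] = parsedMatrix[i][xa[0]:xa[len(xa)-1]+1]
--
--     return xa, ya, parsedMatrix
-- ===== SOURCE B (Python) =====
-- def parsCord(matrix, n, x, y, orderX, orderY):
--     # closest grid index to an integer coordinate is just its clamp into [0, n];
--     # slice a lazy range instead of materialising and scanning list(range(n+1))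
--     idx = range(n + 1)
--     clsX = min(max(x, 0), n)
--     clsY = min(max(y, 0), n)
--     xa = idx[n - orderX:] if clsX >= n - orderX else idx[clsX:clsX + orderX + 1]
--     ya = idx[n - orderY:] if clsY >= n - orderY else idx[clsY:clsY + orderY + 1]
--     sub = [row[xa[0]:xa[-1] + 1] for row in matrix[ya[0]:ya[-1] + 1]]
--     return list(xa), list(ya), sub
-- ===== Notes on version B (the rewrite author's own statement) =====
-- stated objective: alternative
-- what changed: A materialises list(range(n+1)) and linearly scans all n+1 grid points (twice) to find the closest index; B computes it in O(1) as clamp(x,0,n) and slices a lazy range instead, and the row-rewriting index loop becomes a comprehension.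
import Mathlib
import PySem

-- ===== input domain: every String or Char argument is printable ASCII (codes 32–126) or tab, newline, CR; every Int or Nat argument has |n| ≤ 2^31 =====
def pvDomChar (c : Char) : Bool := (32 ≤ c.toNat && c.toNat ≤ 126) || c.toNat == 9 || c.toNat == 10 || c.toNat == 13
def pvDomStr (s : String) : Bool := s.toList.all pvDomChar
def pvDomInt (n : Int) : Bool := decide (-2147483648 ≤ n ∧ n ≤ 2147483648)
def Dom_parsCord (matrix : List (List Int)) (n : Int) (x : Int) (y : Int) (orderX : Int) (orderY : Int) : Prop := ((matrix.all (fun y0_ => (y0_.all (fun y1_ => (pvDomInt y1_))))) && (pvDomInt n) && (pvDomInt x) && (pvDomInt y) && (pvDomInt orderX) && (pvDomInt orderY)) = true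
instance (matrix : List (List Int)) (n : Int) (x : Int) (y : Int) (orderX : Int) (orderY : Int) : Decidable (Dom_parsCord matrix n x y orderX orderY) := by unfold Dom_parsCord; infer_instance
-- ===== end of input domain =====

-- B replaces A's linear scans for the closest grid index by the closed form clamp(x,0,n) and
-- slices a lazy range instead of materialising list(range(n+1)) (alternative algorithm, same
-- measured cost); equivalence is about the return value only (A mutates only its own local copy).

-- ===== PORT A =====
def parsCord (matrix : List (List Int)) (n : Int) (x : Int) (y : Int) (orderX : Int) (orderY : Int) : List Int × List Int × List (List Int) :=
  let xa := PySem.List.pyRange 0 (n+1) 1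
  let ya := PySem.List.pyRange 0 (n+1) 1
  let clsX := (xa.foldl (fun (st : Int × Int) i => if |x - i| < st.2 then (i, |x - i|) else st)
      (0, |x - PySem.List.pyGetD xa 0 0|)).1
  let clsY := (ya.foldl (fun (st : Int × Int) i => if |y - i| < st.2 then (i, |y - i|) else st)
      (0, |y - PySem.List.pyGetD ya 0 0|)).1
  let xa2 := if clsX ≥ n - orderX then PySem.List.slice xa (some (n - orderX)) none
             else PySem.List.slice xa (some clsX) (some (clsX + orderX + 1))
  let ya2 := if clsY ≥ n - orderY then PySem.List.slice ya (some (n - orderY)) none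
             else PySem.List.slice ya (some clsY) (some (clsY + orderY + 1))
  let pm0 := PySem.List.slice matrix (some (PySem.List.pyGetD ya2 0 0))
      (some (PySem.List.pyGetD ya2 ((ya2.length : Int) - 1) 0 + 1))
  let pm := (PySem.List.pyRange 0 (pm0.length : Int) 1).foldl
      (fun acc i => PySem.List.pySetD acc i (PySem.List.slice (PySem.List.pyGetD acc i [])
        (some (PySem.List.pyGetD xa2 0 0)) (some (PySem.List.pyGetD xa2 ((xa2.length : Int) - 1) 0 + 1)))) pm0
  (xa2, ya2, pm)

-- ===== PORT B =====
def parsCord_alt (matrix : List (List Int)) (n : Int) (x : Int) (y : Int) (orderX : Int) (orderY : Int) : List Int × List Int × List (List Int) :=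
  let idx := PySem.List.pyRange 0 (n+1) 1
  let clsX := min (max x 0) n
  let clsY := min (max y 0) n
  let xa := if clsX ≥ n - orderX then PySem.List.slice idx (some (n - orderX)) none
            else PySem.List.slice idx (some clsX) (some (clsX + orderX + 1))
  let ya := if clsY ≥ n - orderY then PySem.List.slice idx (some (n - orderY)) none
            else PySem.List.slice idx (some clsY) (some (clsY + orderY + 1))
  let sub := (PySem.List.slice matrix (some (PySem.List.pyGetD ya 0 0))
      (some (PySem.List.pyGetD ya (-1) 0 + 1))).map
      (fun row => PySem.List.slice row (some (PySem.List.pyGetD xa 0 0))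
        (some (PySem.List.pyGetD xa (-1) 0 + 1)))
  (xa, ya, sub)

-- ===== PRECONDITION & SPEC =====
-- Pre_ excludes n < 0 (A raises IndexError on the empty range) and negative window orders,
-- on which A raises IndexError on an empty slice for most values and on the remaining few
-- returns a negative-slice wraparound artefact; B happens to agree wherever A still returns.
def Pre_parsCord (matrix : List (List Int)) (n : Int) (x : Int) (y : Int) (orderX : Int) (orderY : Int) : Prop :=
  0 ≤ n ∧ 0 ≤ orderX ∧ 0 ≤ orderY
instance (matrix : List (List Int)) (n : Int) (x : Int) (y : Int) (orderX : Int) (orderY : Int) : Decidable (Pre_parsCord matrix n x y orderX orderY) := by unfold Pre_parsCord; infer_instance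
def pvWitness_parsCord : List (List Int) × Int × Int × Int × Int × Int := ([[1,2],[3,4]], 1, 0, 1, 1, 1)
def Spec_parsCord (matrix : List (List Int)) (n : Int) (x : Int) (y : Int) (orderX : Int) (orderY : Int) (out : List Int × List Int × List (List Int)) : Prop := out = parsCord_alt matrix n x y orderX orderY
instance (matrix : List (List Int)) (n : Int) (x : Int) (y : Int) (orderX : Int) (orderY : Int) (out : List Int × List Int × List (List Int)) : Decidable (Spec_parsCord matrix n x y orderX orderY out) := by unfold Spec_parsCord; infer_instance

-- ===== CLAIM (what is proved, stated in full; the proofs are below) =====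
def Claim_equal_parsCord : Prop := ∀ (matrix : List (List Int)) (n : Int) (x : Int) (y : Int) (orderX : Int) (orderY : Int), Dom_parsCord matrix n x y orderX orderY → Pre_parsCord matrix n x y orderX orderY → Spec_parsCord matrix n x y orderX orderY (parsCord matrix n x y orderX orderY)

-- ===== LEMMAS AND PROOFS =====

-- head of range(n+1) is 0
theorem pv_head0 (n : Int) (h : 0 ≤ n) : PySem.List.pyGetD (PySem.List.pyRange 0 (n+1) 1) 0 0 = 0 := by
  rw [PySem.List.pyRange_one_cons (by omega)]
  simp [PySem.List.pyGetD_zero_cons]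

-- A's closest-index scan over range(m+1) computes clamp(x, 0, m)
theorem pv_clamp_fold (x : Int) (m : Nat) :
    (PySem.List.pyRange 0 ((m : Int)+1) 1).foldl
      (fun (st : Int × Int) i => if |x - i| < st.2 then (i, |x - i|) else st) (0, |x|)
    = (min (max x 0) (m : Int), |x - min (max x 0) (m : Int)|) := by
  induction m with
  | zero =>
    have h1 : PySem.List.pyRange (0:Int) (((0:Nat):Int)+1) 1 = [0] := by
      rw [show (((0:Nat):Int)+1) = (0:Int)+1 by norm_num]
      exact PySem.List.pyRange_one_singleton 0
    rw [h1]
    simp only [List.foldl_cons, List.foldl_nil, sub_zero, Nat.cast_zero]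
    simp only [Int.abs_eq_natAbs]
    split_ifs with hi <;> simp only [Prod.mk.injEq] <;> constructor <;> omega
  | succ k ih =>
    have hcast : (((k+1:Nat)):Int) = (k:Int)+1 := by push_cast; ring
    rw [hcast, PySem.List.pyRange_one_succ_right (by positivity : (0:Int) ≤ (k:Int)+1),
        List.foldl_append, ih]
    simp only [List.foldl_cons, List.foldl_nil, Int.abs_eq_natAbs]
    split_ifs with hi <;> simp only [Prod.mk.injEq] <;> constructor <;> omega

theorem pv_clamp_fold_int (x n : Int) (h : 0 ≤ n) :
    ((PySem.List.pyRange 0 (n+1) 1).foldl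
      (fun (st : Int × Int) i => if |x - i| < st.2 then (i, |x - i|) else st) (0, |x|)).1
    = min (max x 0) n := by
  have hn : n = ((n.toNat : Nat) : Int) := by omega
  rw [hn, pv_clamp_fold x n.toNat]

-- the selected index window is never empty when 0 ≤ order and 0 ≤ cls ≤ n
theorem pv_window_ne (n order cls : Int) (hn : 0 ≤ n) (ho : 0 ≤ order)
    (h0 : 0 ≤ cls) (h1 : cls ≤ n) :
    (if cls ≥ n - order then PySem.List.slice (PySem.List.pyRange 0 (n+1) 1) (some (n - order)) none
     else PySem.List.slice (PySem.List.pyRange 0 (n+1) 1) (some cls) (some (cls + order + 1))) ≠ [] := by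
  have hlen : (PySem.List.pyRange 0 (n+1) 1).length = (n+1).toNat := by
    rw [PySem.List.length_pyRange_one]; congr 1; omega
  split_ifs with hb
  · rw [PySem.List.slice_some_none]
    simp only [ne_eq, List.drop_eq_nil_iff, not_le]
    simp only [PySem.List.clampIdx, hlen] at *
    split_ifs <;> omega
  · intro hnil
    have := congrArg List.length hnil
    rw [PySem.List.length_slice] at this
    simp only [PySem.List.clampIdx, hlen, List.length_nil] at this
    split_ifs at this <;> omega

-- xs[len(xs)-1] = xs[-1] on nonempty xs
theorem pv_last_eq {α : Type} (xs : List α) (d : α) (h : xs ≠ []) :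
    PySem.List.pyGetD xs ((xs.length : Int) - 1) d = PySem.List.pyGetD xs (-1) d := by
  have hl : 0 < xs.length := List.length_pos_iff.mpr h
  rw [PySem.List.pyGetD_neg_one xs d h,
      PySem.List.pyGetD_eq_getElem xs d (by omega) (by omega),
      List.getLast_eq_getElem]
  congr 1
  omega

-- the in-place row-rewriting loop is a map over the rows
theorem pv_setrows (a b : Int) :
    ∀ (pending done : List (List Int)),
    (PySem.List.pyRange (done.length : Int) ((done.length : Int) + (pending.length : Int)) 1).foldl
      (fun acc i => PySem.List.pySetD acc i (PySem.List.slice (PySem.List.pyGetD acc i []) (some a) (some b)))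
      (done.map (fun row => PySem.List.slice row (some a) (some b)) ++ pending)
    = (done ++ pending).map (fun row => PySem.List.slice row (some a) (some b)) := by
  intro pending
  induction pending with
  | nil =>
    intro done
    rw [show ((done.length : Int) + (([] : List (List Int)).length : Int)) = (done.length : Int) by simp,
        PySem.List.pyRange_one_eq_nil (le_refl _)]
    simp
  | cons p ps ih =>
    intro done
    have hL : ((done.length : Int) < (done.length : Int) + ((p :: ps).length : Int)) := by
      simp
    rw [PySem.List.pyRange_one_cons hL, List.foldl_cons]
    have hget : PySem.List.pyGetD (done.map (fun row => PySem.List.slice row (some a) (some b)) ++ p :: ps) (done.length : Int) [] = p := by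
      rw [PySem.List.pyGetD_natCast]
      simp [List.getD_eq_getElem?_getD]
    have hset : PySem.List.pySetD (done.map (fun row => PySem.List.slice row (some a) (some b)) ++ p :: ps) (done.length : Int) (PySem.List.slice p (some a) (some b)) = (done ++ [p]).map (fun row => PySem.List.slice row (some a) (some b)) ++ ps := by
      rw [PySem.List.pySetD_natCast]
      rw [show done.length = (done.map (fun row => PySem.List.slice row (some a) (some b))).length + 0 by simp]
      rw [List.set_append_right _ _ (by omega)]
      simp
    rw [hget, hset]
    rw [show ((done.length : Int) + ((p :: ps).length : Int)) = (((done ++ [p]).length : Int) + (ps.length : Int)) by simp only [List.length_append, List.length_cons, List.length_nil]; push_cast; omega]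
    rw [show ((done.length : Int) + 1) = ((done ++ [p]).length : Int) by simp only [List.length_append, List.length_cons, List.length_nil]; push_cast; omega]
    rw [ih (done ++ [p])]
    simp

theorem pv_setrows0 (a b : Int) (l : List (List Int)) :
    (PySem.List.pyRange 0 (l.length : Int) 1).foldl
      (fun acc i => PySem.List.pySetD acc i (PySem.List.slice (PySem.List.pyGetD acc i []) (some a) (some b)))
      l
    = l.map (fun row => PySem.List.slice row (some a) (some b)) := by
  have h := pv_setrows a b l []
  simpa using h

-- ===== VERDICT (by name: the statement is the Claim_ definition above) =====
theorem parsCord_spec : Claim_equal_parsCord := by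
  intro matrix n x y orderX orderY _hdom hpre
  obtain ⟨hn, hox, hoy⟩ := hpre
  unfold Spec_parsCord parsCord parsCord_alt
  simp only [pv_head0 n hn, sub_zero]
  rw [pv_clamp_fold_int x n hn, pv_clamp_fold_int y n hn]
  have hx0 : 0 ≤ min (max x 0) n := le_min (le_max_right x 0) hn
  have hx1 : min (max x 0) n ≤ n := min_le_right _ _
  have hy0 : 0 ≤ min (max y 0) n := le_min (le_max_right y 0) hn
  have hy1 : min (max y 0) n ≤ n := min_le_right _ _
  have hWx := pv_window_ne n orderX (min (max x 0) n) hn hox hx0 hx1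
  have hWy := pv_window_ne n orderY (min (max y 0) n) hn hoy hy0 hy1
  rw [pv_last_eq _ 0 hWx, pv_last_eq _ 0 hWy]
  rw [pv_setrows0]
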